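-- pv_equiv track=rewrite | github.com/demianAdli/python_dsa | pythonic_dsa_chapter_04/summation_puzzle.py | eval_equation
-- ===== SOURCE A (Python) =====
-- def eq_dict(equation):
--     no_duplicate = {"+": 0, "=": 0}
--     ind = 0
--     for letter in equation:
--         if letter not in no_duplicate and letter not in '+=':
--             no_duplicate[letter] = ind
--             ind += 1
--     return no_duplicate
--
-- def eval_equation(equation):
--     chars_dict = eq_dict(equation)
--     hint_chars = 0
--     answer_chars = 0
--     for each in equation:
--         hint_chars += chars_dict[each]
--         answer_chars += chars_dict[each]
--         if each == "=":
--             answer_chars = 0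
--     hint_chars -= answer_chars
--     return hint_chars, answer_chars, hint_chars == answer_chars
-- ===== SOURCE B (Python) =====
-- def eval_equation(equation):
--     # No index dictionary and no running accumulator: a letter's value is the
--     # number of distinct non-'+=' characters before its first occurrence, and
--     # each segment sum is taken per distinct letter, weighted by how often the
--     # letter occurs in the segment (whole string / after the last '=';
--     # rfind = -1 makes the tail the whole string, matching the no-'=' case).
--     tail = equation[equation.rfind('=') + 1:]
--     letters = [c for c in dict.fromkeys(equation) if c not in '+=']
--     def value(c):
--         return len({d for d in equation[:equation.index(c)] if d not in '+='})
--     total = sum(value(c) * equation.count(c) for c in letters)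
--     answer = sum(value(c) * tail.count(c) for c in letters)
--     hint = total - answer
--     return hint, answer, hint == answer
-- ===== Notes on version B (the rewrite author's own statement) =====
-- stated objective: alternative
-- what changed: Eliminates the first-occurrence index dictionary and the reset-at-'=' accumulator: each distinct letter's value is recomputed as the cardinality of the set of distinct non-'+=' characters before its first occurrence, and the two results are per-letter count-weighted sums over two segments (whole string, and the slice after rfind('=')) with hint = total - answer.
import Mathlib
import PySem

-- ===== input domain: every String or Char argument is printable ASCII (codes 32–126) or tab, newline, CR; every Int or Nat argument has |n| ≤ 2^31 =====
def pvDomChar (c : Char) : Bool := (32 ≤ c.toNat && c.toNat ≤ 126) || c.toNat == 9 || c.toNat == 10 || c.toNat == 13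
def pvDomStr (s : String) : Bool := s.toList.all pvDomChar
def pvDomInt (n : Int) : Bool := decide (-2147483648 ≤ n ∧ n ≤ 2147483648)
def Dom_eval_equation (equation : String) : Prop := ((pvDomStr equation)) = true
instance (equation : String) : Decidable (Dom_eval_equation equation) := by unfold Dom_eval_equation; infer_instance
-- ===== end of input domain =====

-- B drops A's first-occurrence index dictionary and reset-at-'=' accumulator: each distinct
-- letter's value is recomputed as the size of the set of distinct non-'+=' characters before
-- its first occurrence, and the results are per-letter count-weighted sums over two segments
-- (whole string / after rfind('=')) (objective: alternative).

-- ===== PORT A =====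
-- loop body of eq_dict ('letter not in no_duplicate and letter not in "+="'; for the 1-char
-- string letter, membership in '+=' is exactly letter = '+' ∨ letter = '=')
def pvStepA (st : PySem.Dict Char Int × Int) (letter : Char) : PySem.Dict Char Int × Int :=
  if ¬ st.1.contains letter = true ∧ ¬ (letter = '+' ∨ letter = '=') then
    (st.1.insert letter st.2, st.2 + 1)
  else st

def eq_dict (equation : String) : PySem.Dict Char Int :=
  (equation.toList.foldl pvStepA (PySem.Dict.mk [('+', 0), ('=', 0)], 0)).1

-- loop body of eval_equation's accumulation loop; g is the lookup chars_dict[each]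
-- (ported as getD with default 0, exact here: every character of equation is a key of
-- eq_dict equation, so Python's KeyError branch of chars_dict[each] is unreachable)
def pvStepE (g : Char → Int) (st : Int × Int) (each : Char) : Int × Int :=
  let hint_chars := st.1 + g each
  let answer_chars := st.2 + g each
  if each = '=' then (hint_chars, 0) else (hint_chars, answer_chars)

def eval_equation (equation : String) : Int × Int × Bool :=
  let chars_dict := eq_dict equation
  let r := equation.toList.foldl (pvStepE (fun each => chars_dict.getD each 0)) (0, 0)
  let hint_chars := r.1 - r.2
  (hint_chars, r.2, hint_chars == r.2)

-- ===== PORT B =====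
-- value(c) = len({d for d in equation[:equation.index(c)] if d not in '+='})
-- (equation.index(c) raises only for c ∉ equation; B only applies value to letters
--  drawn from dict.fromkeys(equation), so porting the index as (index? …).getD 0 is exact)
def pvValue (l : List Char) (c : Char) : Int :=
  ((PySem.Set.ofList ((PySem.List.slice l none (some (((PySem.List.index? l c).getD 0 : Nat) : Int))).filter
      (fun d => !(d == '+' || d == '=')))).length : Int)

def eval_equation_alt (equation : String) : Int × Int × Bool :=
  let l := equation.toList
  let tail := PySem.List.slice l (some (PySem.Chars.rfind l ['='] + 1)) none
  let letters := (PySem.List.dedup l).filter (fun c => !(c == '+' || c == '='))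
  let total := (letters.map (fun c => pvValue l c * (PySem.Chars.count l [c] : Int))).sum
  let answer := (letters.map (fun c => pvValue l c * (PySem.Chars.count tail [c] : Int))).sum
  let hint := total - answer
  (hint, answer, hint == answer)

-- ===== PRECONDITION & SPEC =====
def Spec_eval_equation (equation : String) (out : Int × Int × Bool) : Prop := out = eval_equation_alt equation
instance (equation : String) (out : Int × Int × Bool) : Decidable (Spec_eval_equation equation out) := by unfold Spec_eval_equation; infer_instance

-- ===== CLAIM (what is proved, stated in full; the proofs are below) =====
def Claim_equal_eval_equation : Prop := ∀ (equation : String), Dom_eval_equation equation → Spec_eval_equation equation (eval_equation equation)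

-- ===== LEMMAS AND PROOFS =====

lemma pv_contains_aux (D : List Char) (c : Char) :
    (PySem.Dict.mk (('+',(0:Int)) :: ('=',0) :: (PySem.List.enumerate D).map (fun p => (p.2,p.1)))).contains c
      = ('+' == c || '=' == c || decide (c ∈ D)) := by
  rw [PySem.Dict.contains_mk]
  simp only [List.any_cons, List.any_map]
  have h2 : (PySem.List.enumerate D).any ((fun p => p.1 == c) ∘ (fun p => (p.2, p.1))) = D.any (fun x => x == c) := by
    conv_rhs => rw [← PySem.List.map_snd_enumerate D 0, List.any_map]
    rfl
  rw [h2, Bool.or_assoc]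
  have : D.any (fun x => x == c) = decide (c ∈ D) := by
    by_cases h : c ∈ D <;> simp [h]
    exact fun x hx e => h (e ▸ hx)
  rw [this]

-- A's eq_dict fold keeps ('+',0) and ('=',0) in front, then the remaining characters in
-- first-occurrence order, each paired with its running index.
lemma pv_eqdict_fold (l : List Char) :
    l.foldl pvStepA (PySem.Dict.mk [('+', 0), ('=', 0)], 0)
      = (PySem.Dict.mk (('+', (0 : Int)) :: ('=', 0) ::
            (PySem.List.enumerate (PySem.List.dedup (l.filter (fun c => !(c == '+' || c == '='))))).map
              (fun p => (p.2, p.1))),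
         ((PySem.List.dedup (l.filter (fun c => !(c == '+' || c == '=')))).length : Int)) := by
  induction l using List.reverseRecOn with
  | nil => rfl
  | append_singleton l c ih =>
    rw [List.foldl_append, ih]
    simp only [List.foldl_cons, List.foldl_nil, PySem.List.dedup_eq_ofList]
    by_cases hpe : c = '+' ∨ c = '='
    · have hf : (l ++ [c]).filter (fun c => !(c == '+' || c == '=')) = l.filter (fun c => !(c == '+' || c == '=')) := by
        rcases hpe with h | h <;> simp [h, List.filter_append]
      rw [hf]
      rcases hpe with h | h <;> simp [pvStepA, h]
    · push_neg at hpe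
      have hf : (l ++ [c]).filter (fun c => !(c == '+' || c == '=')) = l.filter (fun c => !(c == '+' || c == '=')) ++ [c] := by
        simp [List.filter_append, hpe.1, hpe.2]
      rw [hf]
      simp only [PySem.Set.ofList_append_singleton]
      have hcont := pv_contains_aux (PySem.Set.ofList (l.filter (fun c => !(c == '+' || c == '=')))) c
      by_cases hmem : c ∈ PySem.Set.ofList (l.filter (fun c => !(c == '+' || c == '=')))
      · rw [PySem.Set.add_of_mem hmem]
        simp only [pvStepA]
        rw [if_neg (fun h => h.1 (by rw [hcont, decide_eq_true hmem]; simp))]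
      · rw [PySem.Set.add_of_not_mem hmem]
        have hplus : ('+' == c) = false := by simp [Ne.symm hpe.1]
        have heq : ('=' == c) = false := by simp [Ne.symm hpe.2]
        have hcf : ({ items := ('+',(0:Int)) :: ('=',0) :: (PySem.List.enumerate (PySem.Set.ofList (List.filter (fun c => !(c == '+' || c == '=')) l))).map (fun p => (p.2,p.1)) } : PySem.Dict Char Int).contains c = false := by
          rw [hcont, hplus, heq, decide_eq_false hmem]; simp
        simp only [pvStepA]
        rw [if_pos ⟨fun h => by rw [hcont, hplus, heq, decide_eq_false hmem] at h; simp at h, fun h => h.elim hpe.1 hpe.2⟩]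
        refine Prod.ext ?_ ?_
        · apply PySem.Dict.ext
          rw [PySem.Dict.items_insert_of_not_contains _ _ hcf]
          simp [PySem.List.enumerate_append, PySem.List.enumerate_cons]
        · simp [PySem.List.enumerate_append]

-- the reset-at-'=' loop of A in closed form (pvTailSum is a proof-side description)
def pvTailSum (g : Char → Int) : List Char → Int
  | [] => 0
  | c :: rest => if c = '=' then 0 else g c + pvTailSum g rest

lemma pv_foldE_eq (g : Char → Int) (l : List Char) (h a : Int) :
    l.foldl (pvStepE g) (h, a)
      = (h + (l.map g).sum,
         if '=' ∈ l then pvTailSum g l.reverse else a + (l.map g).sum) := by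
  induction l using List.reverseRecOn generalizing h a with
  | nil => simp
  | append_singleton l c ih =>
    rw [List.foldl_append, ih]
    by_cases hc : c = '='
    · simp [pvStepE, pvTailSum, hc, List.reverse_append, add_assoc]
    · by_cases hm : '=' ∈ l <;>
        simp [pvStepE, pvTailSum, hc, hm, Ne.symm hc, List.reverse_append, add_assoc] <;> omega

-- get? of the enumerate-built tail of A's dict is the positional index
lemma pv_get?_enum (D : List Char) (c : Char) (s : Int) :
    (PySem.Dict.mk ((PySem.List.enumerate D s).map (fun p => (p.2, p.1)))).get? c
      = (PySem.List.index? D c).map (fun k => s + k) := by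
  induction D generalizing s with
  | nil => rfl
  | cons d rest ih =>
    rw [PySem.List.enumerate_cons]
    by_cases hdc : d = c
    · subst hdc
      rw [PySem.List.index?_cons_self]
      simp [PySem.Dict.get?_mk_cons]
    · rw [PySem.List.index?_cons_of_ne rest hdc]
      simp only [List.map_cons, PySem.Dict.get?_mk_cons, beq_iff_eq, hdc, if_false, ih (s + 1),
        Option.map_map]
      cases PySem.List.index? rest c <;> simp <;> ring

-- a fold of Set.add only ever appends
lemma pv_foldl_add_prefix (xs : List Char) (s : PySem.Set Char) :
    ∃ t, xs.foldl PySem.Set.add s = s ++ t := by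
  induction xs generalizing s with
  | nil => exact ⟨[], by simp⟩
  | cons x xs ih =>
    obtain ⟨t, ht⟩ := ih (PySem.Set.add s x)
    by_cases hx : x ∈ s
    · exact ⟨t, by simpa [PySem.Set.add_of_mem hx] using ht⟩
    · exact ⟨x :: t, by rw [List.foldl_cons, ht, PySem.Set.add_of_not_mem hx]; simp⟩

-- the two per-character values agree: A's dict lookup = B's prefix-set cardinality
lemma pv_value_eq (equation : String) (c : Char) (hc : c ∈ equation.toList)
    (hpe : ¬ (c = '+' ∨ c = '=')) :
    (eq_dict equation).getD c 0 = pvValue equation.toList c := by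
  push_neg at hpe
  obtain ⟨i, hi⟩ : ∃ i, PySem.List.index? equation.toList c = some i := by
    have := (PySem.List.index?_isSome_iff (xs := equation.toList) (v := c)).2 hc
    exact Option.isSome_iff_exists.mp this
  obtain ⟨pre, suf, hdec, hlen, hnotpre⟩ := (PySem.List.index?_eq_some_iff _ _ _).1 hi
  have hP : (!(c == '+' || c == '=')) = true := by simp [hpe.1, hpe.2]
  -- B's value: the slice is exactly pre
  have htake : PySem.List.slice equation.toList none (some ((i : Nat) : Int)) = pre := by
    rw [PySem.List.slice_to _ (by positivity), Int.toNat_natCast, hdec, ← hlen,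
      List.take_left]
  have hS : c ∉ PySem.Set.ofList (pre.filter (fun d => !(d == '+' || d == '='))) := by
    intro hmem
    exact hnotpre (List.mem_of_mem_filter ((PySem.Set.mem_ofList _ _).1 hmem))
  -- A's dict value: D decomposes as S ++ c :: t with c ∉ S
  have hD : ∃ t, PySem.List.dedup (equation.toList.filter (fun d => !(d == '+' || d == '=')))
      = PySem.Set.ofList (pre.filter (fun d => !(d == '+' || d == '='))) ++ c :: t := by
    rw [PySem.List.dedup_eq_ofList, hdec, List.filter_append, List.filter_cons, if_pos hP]
    simp only [PySem.Set.ofList]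
    rw [List.foldl_append, List.foldl_cons]
    rw [show List.foldl PySem.Set.add PySem.Set.empty (pre.filter (fun d => !(d == '+' || d == '=')))
          = PySem.Set.ofList (pre.filter (fun d => !(d == '+' || d == '='))) from rfl]
    rw [PySem.Set.add_of_not_mem hS]
    obtain ⟨t, ht⟩ := pv_foldl_add_prefix (suf.filter (fun d => !(d == '+' || d == '=')))
      (PySem.Set.ofList (pre.filter (fun d => !(d == '+' || d == '='))) ++ [c])
    exact ⟨t, by rw [ht]; simp⟩
  obtain ⟨t, ht⟩ := hD
  have hidx : PySem.List.index?
      (PySem.List.dedup (equation.toList.filter (fun d => !(d == '+' || d == '=')))) c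
      = some (PySem.Set.ofList (pre.filter (fun d => !(d == '+' || d == '=')))).length := by
    rw [PySem.List.index?_eq_some_iff]
    exact ⟨_, t, ht, rfl, hS⟩
  have hA : eq_dict equation = PySem.Dict.mk (('+',(0:Int)) :: ('=',0) ::
      (PySem.List.enumerate (PySem.List.dedup (equation.toList.filter (fun c => !(c == '+' || c == '='))))).map
        (fun p => (p.2,p.1))) := by
    unfold eq_dict; rw [pv_eqdict_fold]
  rw [hA, PySem.Dict.getD_eq_get?_getD, PySem.Dict.get?_mk_cons, PySem.Dict.get?_mk_cons]
  rw [show (('+' == c) = false) from by simp [Ne.symm hpe.1],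
      show (('=' == c) = false) from by simp [Ne.symm hpe.2]]
  simp only [Bool.false_eq_true, if_false]
  rw [pv_get?_enum _ _ 0, hidx]
  simp only [Option.map_some, Option.getD_some, zero_add, pvValue, hi, htake]
  rfl

-- dropping the 0-valued '+' and '=' letters does not change a weighted lookup sum
lemma pv_sum_filter (equation : String) (k : Char → Int) (L : List Char) :
    ((L.map (fun c => (eq_dict equation).getD c 0 * k c)).sum : Int)
      = ((L.filter (fun c => !(c == '+' || c == '='))).map
          (fun c => (eq_dict equation).getD c 0 * k c)).sum := by
  have hA : eq_dict equation = PySem.Dict.mk (('+',(0:Int)) :: ('=',0) ::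
      (PySem.List.enumerate (PySem.List.dedup (equation.toList.filter (fun c => !(c == '+' || c == '='))))).map
        (fun p => (p.2,p.1))) := by
    unfold eq_dict; rw [pv_eqdict_fold]
  induction L with
  | nil => rfl
  | cons c rest ih =>
    rw [List.map_cons, List.sum_cons, List.filter_cons, ih]
    by_cases hpe : c = '+' ∨ c = '='
    · have hz : (eq_dict equation).getD c 0 = 0 := by
        rw [hA, PySem.Dict.getD_eq_get?_getD]
        rcases hpe with h | h <;> simp [PySem.Dict.get?_mk_cons, h]
      have hPf : (!(c == '+' || c == '=')) = false := by
        rcases hpe with h | h <;> simp [h]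
      rw [hz, hPf]; simp
    · push_neg at hpe
      simp [hpe.1, hpe.2]
-- [a].isPrefixOf t holds exactly when t starts with a
lemma pv_isPrefix_singleton (a : Char) (t : List Char) :
    ([a].isPrefixOf t = true) ↔ ∃ ts, t = a :: ts := by
  cases t with
  | nil => simp [List.isPrefixOf]
  | cons b ts =>
    constructor
    · intro h
      simp [List.isPrefixOf] at h
      exact ⟨ts, by rw [h]⟩
    · rintro ⟨ts', hts⟩
      cases hts
      simp [List.isPrefixOf]

-- s.count(c) for a single character is the plain list count
lemma pv_count_go (c : Char) (l : List Char) (fuel acc : Nat) (hf : l.length ≤ fuel) :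
    PySem.Chars.count.go [c] fuel l acc = acc + l.count c := by
  induction l generalizing fuel acc with
  | nil => cases fuel <;> simp [PySem.Chars.count.go]
  | cons x tl ih =>
    obtain ⟨f, rfl⟩ : ∃ f, fuel = f + 1 := by
      cases fuel with
      | zero => simp at hf
      | succ f => exact ⟨f, rfl⟩
    show (if [c].isPrefixOf (x :: tl) = true then
        PySem.Chars.count.go [c] f (List.drop [c].length (x :: tl)) (acc + 1)
      else PySem.Chars.count.go [c] f tl acc) = acc + (x :: tl).count c
    by_cases hx : x = c
    · rw [if_pos ((pv_isPrefix_singleton c _).2 ⟨tl, by rw [hx]⟩)]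
      simp only [List.length_cons, List.length_nil, List.drop_succ_cons, List.drop_zero]
      rw [ih f (acc + 1) (by simpa using Nat.lt_succ_iff.mp (Nat.lt_succ_of_le hf))]
      simp [hx, List.count_cons]
      omega
    · rw [if_neg (by
        intro hp
        obtain ⟨ts, hts⟩ := (pv_isPrefix_singleton c _).1 hp
        injection hts with h1 _
        exact hx h1)]
      rw [ih f acc (by simpa using Nat.lt_succ_iff.mp (Nat.lt_succ_of_le hf))]
      simp [List.count_cons, hx]
lemma pv_count_singleton (l : List Char) (c : Char) :
    PySem.Chars.count l [c] = l.count c := by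
  show (if ([c] : List Char).isEmpty = true then l.length + 1
      else PySem.Chars.count.go [c] l.length l 0) = l.count c
  rw [if_neg (by simp)]
  rw [pv_count_go c l l.length 0 (le_refl _), Nat.zero_add]

-- a sum of ite-weighted terms over a duplicate-free list picks out one term
lemma pv_sum_ite (g : Char → Int) (L : List Char) (x : Char) (hn : L.Nodup) :
    (L.map (fun c => g c * (if c = x then (1:Int) else 0))).sum
      = if x ∈ L then g x else 0 := by
  induction L with
  | nil => simp
  | cons y L ih =>
    rw [List.nodup_cons] at hn
    rw [List.map_cons, List.sum_cons, ih hn.2]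
    by_cases hyx : y = x
    · subst hyx
      simp [hn.1]
    · simp [hyx, Ne.symm hyx]

-- a lookup sum over a list is the count-weighted sum over any duplicate-free superset
lemma pv_sum_weighted (g : Char → Int) (L l' : List Char) (hn : L.Nodup)
    (hsub : ∀ x ∈ l', x ∈ L) :
    ((l'.map g).sum : Int) = (L.map (fun c => g c * (l'.count c : Int))).sum := by
  induction l' with
  | nil => simp
  | cons x rest ih =>
    rw [List.map_cons, List.sum_cons, ih (fun y hy => hsub y (List.mem_cons_of_mem x hy))]
    have hsplit : ∀ c : Char, (((x :: rest).count c : Int))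
        = (rest.count c : Int) + (if c = x then (1:Int) else 0) := by
      intro c
      by_cases hcx : c = x
      · simp [List.count_cons, hcx]
      · simp [List.count_cons, hcx]
        exact fun h => hcx h.symm
    calc g x + (L.map (fun c => g c * (rest.count c : Int))).sum
        = (L.map (fun c => g c * (rest.count c : Int))).sum
            + (L.map (fun c => g c * (if c = x then (1:Int) else 0))).sum := by
          rw [pv_sum_ite g L x hn, if_pos (hsub x List.mem_cons_self)]; ring
      _ = (L.map (fun c => g c * (rest.count c : Int) + g c * (if c = x then (1:Int) else 0))).sum := by
          rw [← PySem.List.sum_map_add_int]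
      _ = (L.map (fun c => g c * ((x :: rest).count c : Int))).sum := by
          refine congrArg List.sum (List.map_congr_left ?_)
          intro c _
          rw [hsplit c]; ring

-- any lookup sum over characters of equation equals B's count-weighted value-sum
lemma pv_sum_eq (equation : String) (l' : List Char) (hsub : ∀ c ∈ l', c ∈ equation.toList) :
    ((l'.map (fun c => (eq_dict equation).getD c 0)).sum : Int)
      = (((PySem.List.dedup equation.toList).filter (fun c => !(c == '+' || c == '='))).map
          (fun c => pvValue equation.toList c * (PySem.Chars.count l' [c] : Int))).sum := by
  have hn : (PySem.List.dedup equation.toList).Nodup := PySem.List.nodup_dedup _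
  have hsub' : ∀ x ∈ l', x ∈ PySem.List.dedup equation.toList := by
    intro x hx
    rw [PySem.List.dedup_eq_ofList, PySem.Set.mem_ofList]
    exact hsub x hx
  rw [pv_sum_weighted (fun c => (eq_dict equation).getD c 0) _ l' hn hsub']
  rw [pv_sum_filter equation (fun c => (l'.count c : Int)) (PySem.List.dedup equation.toList)]
  refine congrArg List.sum (List.map_congr_left ?_)
  intro c hcf
  have hm := List.mem_filter.1 hcf
  have hcl : c ∈ equation.toList := by
    have := hm.1
    rw [PySem.List.dedup_eq_ofList, PySem.Set.mem_ofList] at this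
    exact this
  have hpe : ¬ (c = '+' ∨ c = '=') := by
    intro h
    rcases h with h | h <;> simp [h] at hm
  rw [pv_value_eq equation c hcl hpe, pv_count_singleton]
-- rfind.go returns -1 when no position ≤ fuel starts with '='
lemma pv_rfind_go_neg (s : List Char) (f : Nat)
    (h : ∀ i ≤ f, ¬ ∃ ts, s.drop i = '=' :: ts) :
    PySem.Chars.rfind.go s ['='] f = -1 := by
  induction f with
  | zero =>
    have h0 := h 0 (le_refl 0)
    rw [List.drop_zero] at h0
    show (if ['='].isPrefixOf s = true then (0:Int) else -1) = -1
    rw [if_neg (fun hp => h0 ((pv_isPrefix_singleton '=' s).1 hp))]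
  | succ j ih =>
    show (if ['='].isPrefixOf (s.drop (j+1)) = true then ((j:Int)+1) else PySem.Chars.rfind.go s ['='] j) = -1
    rw [if_neg (fun hp => h (j+1) (le_refl _) ((pv_isPrefix_singleton '=' _).1 hp))]
    exact ih (fun i hi => h i (Nat.le_succ_of_le hi))

-- rfind.go finds the last '=' when the string splits as u ++ '=' :: w with '=' ∉ w
lemma pv_rfind_go_pos (u w : List Char) (hw : ('=' : Char) ∉ w) (f : Nat) (hf : u.length ≤ f) :
    PySem.Chars.rfind.go (u ++ '=' :: w) ['='] f = (u.length : Int) := by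
  induction f with
  | zero =>
    have hu : u = [] := List.eq_nil_of_length_eq_zero (Nat.le_zero.1 hf)
    subst hu
    show (if ['='].isPrefixOf ('=' :: w) = true then (0:Int) else -1) = 0
    rw [if_pos ((pv_isPrefix_singleton '=' _).2 ⟨w, rfl⟩)]
  | succ j ih =>
    show (if ['='].isPrefixOf ((u ++ '=' :: w).drop (j+1)) = true then ((j:Int)+1)
          else PySem.Chars.rfind.go (u ++ '=' :: w) ['='] j) = (u.length : Int)
    rcases Nat.lt_or_ge u.length (j+1) with hlt | hge
    · -- position j+1 is inside w (or past the end): no '=' there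
      have hnp : ¬ (['='].isPrefixOf ((u ++ '=' :: w).drop (j+1)) = true) := by
        intro hp
        obtain ⟨ts, hts⟩ := (pv_isPrefix_singleton '=' _).1 hp
        have hd : (u ++ '=' :: w).drop (j+1) = w.drop (j - u.length) := by
          rw [List.drop_append, List.drop_eq_nil_of_le (by omega), List.nil_append,
            show j+1-u.length = (j-u.length)+1 by omega, List.drop_succ_cons]
        have hm' : ('=' : Char) ∈ w.drop (j - u.length) := by
          rw [← hd, hts]; exact List.mem_cons_self
        exact hw (List.mem_of_mem_drop hm')
      rw [if_neg hnp]
      exact ih (by omega)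
    · -- u.length = j+1 : position j+1 is exactly the last '='
      have heq : u.length = j + 1 := by omega
      have hdrop : (u ++ '=' :: w).drop (j+1) = '=' :: w := by
        rw [← heq, List.drop_left]
      rw [if_pos ((pv_isPrefix_singleton '=' _).2 ⟨w, by rw [hdrop]⟩), heq]
      push_cast
      ring

-- every string containing '=' splits after its last '='
lemma pv_last_eq_split (l : List Char) (h : ('=' : Char) ∈ l) :
    ∃ u w, l = u ++ '=' :: w ∧ ('=' : Char) ∉ w := by
  induction l using List.reverseRecOn with
  | nil => cases h
  | append_singleton l c ih =>
    by_cases hc : c = '='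
    · exact ⟨l, [], by simp [hc], by simp⟩
    · have hm : ('=' : Char) ∈ l := by
        rcases List.mem_append.1 h with h' | h'
        · exact h'
        · simp at h'; exact absurd h'.symm hc
      obtain ⟨u, w, hlw, hwn⟩ := ih hm
      exact ⟨u, w ++ [c], by rw [hlw]; simp, by
        intro hmem
        rcases List.mem_append.1 hmem with h' | h'
        · exact hwn h'
        · simp at h'; exact hc h'.symm⟩

-- A's tail-sum over xs ++ '=' :: ys with '=' ∉ xs is the plain sum over xs
lemma pv_tailSum_append (g : Char → Int) (xs ys : List Char) (h : ('=' : Char) ∉ xs) :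
    pvTailSum g (xs ++ '=' :: ys) = (xs.map g).sum := by
  induction xs with
  | nil => simp [pvTailSum]
  | cons x rest ih =>
    simp only [List.mem_cons, not_or] at h
    rw [List.cons_append]
    simp only [pvTailSum, if_neg (Ne.symm h.1 : x ≠ '=')]
    rw [ih h.2, List.map_cons, List.sum_cons]

-- ===== VERDICT (by name: the statement is the Claim_ definition above) =====
theorem eval_equation_spec : Claim_equal_eval_equation := by
  intro equation _
  unfold Spec_eval_equation
  simp only [eval_equation, eval_equation_alt]
  rw [pv_foldE_eq]
  by_cases hm : ('=' : Char) ∈ equation.toList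
  · obtain ⟨u, w, hlw, hwn⟩ := pv_last_eq_split equation.toList hm
    have hrfind : PySem.Chars.rfind equation.toList ['='] = (u.length : Int) := by
      show PySem.Chars.rfind.go equation.toList ['='] equation.toList.length = _
      rw [hlw]
      exact pv_rfind_go_pos u w hwn _ (by simp)
    have hslice : PySem.List.slice equation.toList (some (PySem.Chars.rfind equation.toList ['='] + 1)) none = w := by
      rw [hrfind, PySem.List.slice_from _ (by positivity)]
      rw [show ((u.length : Int) + 1).toNat = u.length + 1 by omega, hlw]
      rw [List.drop_append, List.drop_eq_nil_of_le (by omega), List.nil_append,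
        show u.length+1-u.length = 0+1 by omega, List.drop_succ_cons, List.drop_zero]
    have hrev : equation.toList.reverse = w.reverse ++ '=' :: u.reverse := by
      rw [hlw]; simp
    have hw_sub : ∀ c ∈ w, c ∈ equation.toList := by
      intro c hc; rw [hlw]; exact List.mem_append.2 (Or.inr (List.mem_cons.2 (Or.inr hc)))
    rw [if_pos hm, hslice, hrev, pv_tailSum_append _ _ _ (by simp [hwn]),
      List.map_reverse, List.sum_reverse, zero_add,
      pv_sum_eq equation _ (fun c hc => hc), pv_sum_eq equation w hw_sub]
  · have hrfind : PySem.Chars.rfind equation.toList ['='] = -1 := by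
      show PySem.Chars.rfind.go equation.toList ['='] equation.toList.length = -1
      refine pv_rfind_go_neg _ _ ?_
      intro i _ ⟨ts, hts⟩
      exact hm (List.mem_of_mem_drop (hts ▸ List.mem_cons_self))
    have hslice : PySem.List.slice equation.toList (some (PySem.Chars.rfind equation.toList ['='] + 1)) none = equation.toList := by
      rw [hrfind]
      show PySem.List.slice equation.toList (some 0) none = equation.toList
      rw [PySem.List.slice_from _ (le_refl 0)]
      simp
    rw [if_neg hm, hslice, zero_add, pv_sum_eq equation _ (fun c hc => hc)]
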